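-- pv_equiv track=rewrite | github.com/victorlavrenko/rofa-dev | rofa/core/cgvf_lite.py | _mentions_unique
-- ===== SOURCE A (Python) =====
-- from typing import Any, Callable, Dict, Iterable, List, Optional, Sequence, Tuple
--
-- def _mentions_unique(excerpts: Sequence[str], unique_tokens: Sequence[str]) -> bool:
--     if not unique_tokens:
--         return False
--     for excerpt in excerpts:
--         lower = excerpt.lower()
--         if any(token in lower for token in unique_tokens):
--             return True
--     return False
-- ===== SOURCE B (Python) =====
-- def _mentions_unique(excerpts, unique_tokens):
--     if not unique_tokens:
--         return False
--     if "" in unique_tokens: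
--         # the empty token is a substring of every excerpt
--         return len(excerpts) > 0
--     # index the tokens by their first character, then scan each excerpt once,
--     # at each position testing only the tokens that can start there
--     buckets = {}
--     for t in unique_tokens:
--         buckets.setdefault(t[0], []).append(t)
--     for excerpt in excerpts:
--         lower = excerpt.lower()
--         for i, ch in enumerate(lower):
--             for t in buckets.get(ch, ()):
--                 if lower.startswith(t, i):
--                     return True
--     return False
-- ===== Notes on version B (the rewrite author's own statement) =====
-- stated objective: alternative
-- what changed: Instead of testing every token against every excerpt with substring `in`, B indexes the tokens by their first character once and scans each lowered excerpt position by position, testing only the tokens that can start at that position (a simple multi-pattern scan); the empty token is answered up front.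
import Mathlib
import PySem

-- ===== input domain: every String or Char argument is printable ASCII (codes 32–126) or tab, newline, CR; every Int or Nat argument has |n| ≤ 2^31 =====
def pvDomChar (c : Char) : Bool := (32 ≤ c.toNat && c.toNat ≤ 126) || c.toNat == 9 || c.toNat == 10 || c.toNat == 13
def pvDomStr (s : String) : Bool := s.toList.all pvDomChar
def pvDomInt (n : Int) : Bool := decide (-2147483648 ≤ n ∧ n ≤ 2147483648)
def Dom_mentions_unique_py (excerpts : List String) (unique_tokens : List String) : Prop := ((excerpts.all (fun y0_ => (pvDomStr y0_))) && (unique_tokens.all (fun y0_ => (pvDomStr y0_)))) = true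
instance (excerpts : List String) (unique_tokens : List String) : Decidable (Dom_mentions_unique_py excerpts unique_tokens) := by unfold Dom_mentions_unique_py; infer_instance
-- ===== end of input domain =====

-- B indexes the tokens by first character and scans each lowered excerpt position by position
-- (alternative multi-pattern scan; same exact result as A's token-by-token `in` tests).

-- ===== PORT A =====
def mentions_unique_py (excerpts : List String) (unique_tokens : List String) : Bool :=
  if unique_tokens.isEmpty then false
  else excerpts.any (fun excerpt =>
    -- lower = excerpt.lower(); any(token in lower for token in unique_tokens)
    unique_tokens.any (fun token => PySem.Str.isIn token (PySem.Str.lower excerpt)))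

-- ===== PORT B =====
-- buckets: for t in unique_tokens: buckets.setdefault(t[0], []).append(t)
def pvBuckets (unique_tokens : List String) : PySem.Dict Char (List String) :=
  unique_tokens.foldl (fun d t =>
    match t.toList with
    | [] => d          -- unreachable: the "" case is handled before buckets are built
    | c :: _ => d.insert c ((d.getD c []) ++ [t])) PySem.Dict.empty

-- for i, ch in enumerate(lower): for t in buckets.get(ch, ()): if lower.startswith(t, i): return True
def pvScan (buckets : PySem.Dict Char (List String)) : List Char → Bool
  | [] => false
  | c :: rest =>
      (buckets.getD c []).any (fun t => PySem.Chars.startswith (c :: rest) t.toList)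
      || pvScan buckets rest

def mentions_unique_py_alt (excerpts : List String) (unique_tokens : List String) : Bool :=
  if unique_tokens.isEmpty then false
  else if unique_tokens.contains "" then !excerpts.isEmpty
  else
    let buckets := pvBuckets unique_tokens
    excerpts.any (fun excerpt => pvScan buckets (PySem.Chars.lower excerpt.toList))

-- ===== PRECONDITION & SPEC =====
def Spec_mentions_unique_py (excerpts : List String) (unique_tokens : List String) (out : Bool) : Prop := out = mentions_unique_py_alt excerpts unique_tokens
instance (excerpts : List String) (unique_tokens : List String) (out : Bool) : Decidable (Spec_mentions_unique_py excerpts unique_tokens out) := by unfold Spec_mentions_unique_py; infer_instance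

-- ===== CLAIM (what is proved, stated in full; the proofs are below) =====
def Claim_equal_mentions_unique_py : Prop := ∀ (excerpts : List String) (unique_tokens : List String), Dom_mentions_unique_py excerpts unique_tokens → Spec_mentions_unique_py excerpts unique_tokens (mentions_unique_py excerpts unique_tokens)

-- ===== LEMMAS AND PROOFS =====

-- bucket contents: t is in bucket c iff t is a processed token whose first character is c
theorem pvBuckets_aux (tokens : List String) (d : PySem.Dict Char (List String)) (c : Char) (t : String) :
    t ∈ (tokens.foldl (fun d t =>
      match t.toList with
      | [] => d
      | c :: _ => d.insert c ((d.getD c []) ++ [t])) d).getD c []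
    ↔ t ∈ d.getD c [] ∨ (t ∈ tokens ∧ t.toList.head? = some c) := by
  induction tokens generalizing d with
  | nil => simp
  | cons t0 rest ih =>
    simp only [List.foldl_cons]
    rcases h0 : t0.toList with _ | ⟨c0, tl⟩
    · rw [ih]
      constructor
      · rintro (hd | ⟨hr, hh⟩)
        · exact Or.inl hd
        · exact Or.inr ⟨List.mem_cons_of_mem _ hr, hh⟩
      · rintro (hd | ⟨hm, hh⟩)
        · exact Or.inl hd
        · rcases List.mem_cons.mp hm with rfl | hr
          · rw [h0] at hh; simp at hh
          · exact Or.inr ⟨hr, hh⟩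
    · have hh0 : t0.toList.head? = some c0 := by rw [h0]; rfl
      by_cases hc : c = c0
      · subst hc
        have hins : ((d.insert c ((d.getD c []) ++ [t0])).getD c []) = (d.getD c []) ++ [t0] := by
          simp [pysem]
        rw [ih, hins]
        simp only [List.mem_append, List.mem_cons]
        constructor
        · rintro ((hd | (rfl | hnil)) | ⟨hr, hh⟩)
          · exact Or.inl hd
          · exact Or.inr ⟨Or.inl rfl, hh0⟩
          · cases hnil
          · exact Or.inr ⟨Or.inr hr, hh⟩
        · rintro (hd | ⟨rfl | hr, hh⟩)
          · exact Or.inl (Or.inl hd)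
          · exact Or.inl (Or.inr (Or.inl rfl))
          · exact Or.inr ⟨hr, hh⟩
      · have hins : ((d.insert c0 ((d.getD c0 []) ++ [t0])).getD c []) = d.getD c [] := by
          simp [pysem, hc]
        rw [ih, hins]
        simp only [List.mem_cons]
        constructor
        · rintro (hd | ⟨hr, hh⟩)
          · exact Or.inl hd
          · exact Or.inr ⟨Or.inr hr, hh⟩
        · rintro (hd | ⟨rfl | hr, hh⟩)
          · exact Or.inl hd
          · rw [hh0] at hh; exact absurd (Option.some_inj.mp hh) (fun h => hc h.symm)
          · exact Or.inr ⟨hr, hh⟩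

theorem pvBuckets_mem (tokens : List String) (c : Char) (t : String) :
    t ∈ (pvBuckets tokens).getD c [] ↔ t ∈ tokens ∧ t.toList.head? = some c := by
  unfold pvBuckets
  rw [pvBuckets_aux]
  simp [pysem]

theorem pv_toList_eq_nil (t : String) (h : t.toList = []) : t = "" := by
  cases t; simp_all

theorem pvScan_iff (tokens : List String) (hne : ∀ t ∈ tokens, t ≠ "") (l : List Char) :
    pvScan (pvBuckets tokens) l = true ↔ ∃ t ∈ tokens, t.toList <:+: l := by
  induction l with
  | nil =>
    refine iff_of_false (by simp [pvScan]) ?_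
    rintro ⟨t, ht, hinf⟩
    exact hne t ht (pv_toList_eq_nil t (List.infix_nil.mp hinf))
  | cons c rest ih =>
    simp only [pvScan, Bool.or_eq_true, List.any_eq_true, ih]
    constructor
    · rintro (⟨t, hmem, hsw⟩ | ⟨t, ht, hinf⟩)
      · obtain ⟨ht, _⟩ := (pvBuckets_mem tokens c t).mp hmem
        exact ⟨t, ht, ((PySem.Chars.startswith_iff _ _).mp hsw).isInfix⟩
      · exact ⟨t, ht, (List.infix_cons_iff.mpr (Or.inr hinf))⟩
    · rintro ⟨t, ht, hinf⟩
      rcases List.infix_cons_iff.mp hinf with hpre | hinf'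
      · rcases h0 : t.toList with _ | ⟨c', tl⟩
        · exact absurd (pv_toList_eq_nil t h0) (hne t ht)
        · rw [h0] at hpre
          obtain ⟨rfl, -⟩ := List.cons_prefix_cons.mp hpre
          refine Or.inl ⟨t, (pvBuckets_mem tokens c' t).mpr ⟨ht, by rw [h0]; rfl⟩, ?_⟩
          rw [PySem.Chars.startswith_iff, h0]
          exact hpre
      · exact Or.inr ⟨t, ht, hinf'⟩

-- ===== VERDICT (by name: the statement is the Claim_ definition above) =====
theorem mentions_unique_py_spec : Claim_equal_mentions_unique_py := by
  intro excerpts unique_tokens _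
  unfold Spec_mentions_unique_py mentions_unique_py mentions_unique_py_alt
  by_cases h1 : unique_tokens.isEmpty
  · simp [h1]
  · simp only [if_neg h1]
    by_cases h2 : unique_tokens.contains ""
    · rw [if_pos h2]
      have hmem : "" ∈ unique_tokens := by simpa using h2
      cases excerpts with
      | nil => simp
      | cons e es =>
        simp only [List.any_cons, List.isEmpty_cons, Bool.not_false, Bool.or_eq_true]
        refine Or.inl (List.any_eq_true.mpr ⟨"", hmem, ?_⟩)
        rw [PySem.Str.isIn_iff_infix]
        exact List.nil_infix
    · rw [if_neg h2]
      have hne : ∀ t ∈ unique_tokens, t ≠ "" := by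
        intro t ht heq
        subst heq
        exact h2 (by simpa using ht)
      rw [Bool.eq_iff_iff]
      simp only [List.any_eq_true]
      constructor
      · rintro ⟨e, he, t, ht, htin⟩
        refine ⟨e, he, (pvScan_iff _ hne _).mpr ⟨t, ht, ?_⟩⟩
        have h := (PySem.Str.isIn_iff_infix t (PySem.Str.lower e)).mp htin
        rwa [PySem.Str.toList_lower] at h
      · rintro ⟨e, he, hscan⟩
        obtain ⟨t, ht, hinf⟩ := (pvScan_iff _ hne _).mp hscan
        exact ⟨e, he, t, ht, by
          rw [PySem.Str.isIn_iff_infix, PySem.Str.toList_lower]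
          exact hinf⟩
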